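-- pv_equiv track=rewrite | github.com/Robertus567/Repository-Jap-Robertus-K.S-Semester-2-Alpro2 | Challenge 3 Alpro Week 5.py | find_shortest_circuit
-- ===== SOURCE A (Python) =====
-- graph = {
--     'A': ['B', 'C', 'D'],
--     'B': ['A', 'E'],
--     'C': ['A', 'F', 'K'],
--     'D': ['A', 'J'],
--     'E': ['B', 'G', 'K'],
--     'F': ['C', 'I'],
--     'G': ['E', 'H'],
--     'H': ['G', 'K'],
--     'I': ['F', 'J', 'K'],
--     'J': ['D', 'I'],
--     'K': ['C', 'E', 'H', 'I']
-- }
--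
-- def find_all_paths(start, end, path=[]):
--     """Find all paths from start to end node using DFS"""
--     path = path + [start]
--     if start == end:
--         return [path]
--     paths = []
--     for neighbor in graph[start]:
--         if neighbor not in path:
--             new_paths = find_all_paths(neighbor, end, path)
--             paths.extend(new_paths)
--     return paths
--
-- def find_shortest_circuit(start, end):
--     """Find the shortest circuit from start to end and back to start"""
--     paths = find_all_paths(start, end)
--     if not paths:
--         return None
--
--     circuits = []
--     for path in paths:
--         # Check if end can connect back to start (completing the circuit)
--         if start in graph[end]:
--             circuits.append(path + [start])
--
--     if not circuits:
--         return None
--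
--     # Return the shortest circuit
--     return min(circuits, key=len)
-- ===== SOURCE B (Python) =====
-- graph = {
--     'A': ['B', 'C', 'D'],
--     'B': ['A', 'E'],
--     'C': ['A', 'F', 'K'],
--     'D': ['A', 'J'],
--     'E': ['B', 'G', 'K'],
--     'F': ['C', 'I'],
--     'G': ['E', 'H'],
--     'H': ['G', 'K'],
--     'I': ['F', 'J', 'K'],
--     'J': ['D', 'I'],
--     'K': ['C', 'E', 'H', 'I']
-- }
--
-- def find_shortest_circuit(start, end):
--     """Single DFS keeping only the current shortest start->end path, then close the circuit."""
--     def dfs(node, path, best):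
--         path = path + [node]
--         if node == end:
--             if best is None or len(path) < len(best):
--                 return path
--             return best
--         for nb in graph[node]:
--             if nb not in path:
--                 best = dfs(nb, path, best)
--         return best
--     best = dfs(start, [], None)
--     if best is None:
--         return None
--     if start in graph[end]:
--         return best + [start]
--     return None
-- ===== Notes on version B (the rewrite author's own statement) =====
-- stated objective: alternative
-- what changed: B replaces A's two-stage pipeline (enumerate ALL simple paths into a list, then filter into circuits and take min by length) with a single DFS that threads only the current best (first strictly shortest) path as an accumulator and closes the circuit once at the end.
import Mathlib
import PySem

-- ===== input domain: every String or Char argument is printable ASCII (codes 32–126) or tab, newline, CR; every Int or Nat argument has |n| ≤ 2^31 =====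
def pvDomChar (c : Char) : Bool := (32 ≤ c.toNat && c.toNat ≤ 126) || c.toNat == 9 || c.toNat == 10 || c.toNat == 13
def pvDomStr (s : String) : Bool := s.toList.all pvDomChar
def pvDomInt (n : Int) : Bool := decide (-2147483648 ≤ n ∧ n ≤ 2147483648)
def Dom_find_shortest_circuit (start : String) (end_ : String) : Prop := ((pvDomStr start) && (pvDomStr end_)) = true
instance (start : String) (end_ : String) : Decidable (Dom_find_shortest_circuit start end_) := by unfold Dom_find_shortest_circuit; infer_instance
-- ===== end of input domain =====

-- B does one DFS keeping only the current best path instead of collecting every simple path and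
-- taking min afterwards: same results, no stored path list (objective: alternative, not measured faster).

-- the module-level `graph` both Pythons share
def pyGraph : PySem.Dict String (List String) :=
  PySem.Dict.ofList
  [("A", ["B", "C", "D"]), ("B", ["A", "E"]), ("C", ["A", "F", "K"]), ("D", ["A", "J"]),
   ("E", ["B", "G", "K"]), ("F", ["C", "I"]), ("G", ["E", "H"]), ("H", ["G", "K"]),
   ("I", ["F", "J", "K"]), ("J", ["D", "I"]), ("K", ["C", "E", "H", "I"])]

-- ===== PORT A =====
-- find_all_paths: fuel-guarded only for totality; simple paths over the 11-key graph have length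
-- ≤ 12, so fuel 13 is never exhausted on a call the Python makes.  graph[v] is ported as
-- getD v [] — exact whenever v is a key; the KeyError case is excluded by Pre_.
def find_all_paths (fuel : Nat) (start : String) (end_ : String) (path : List String) : List (List String) :=
  match fuel with
  | 0 => []
  | fuel + 1 =>
    let path := path ++ [start]
    if start = end_ then [path]
    else
      (pyGraph.getD start []).foldl
        (fun paths neighbor =>
          if neighbor ∈ path then paths
          else paths ++ find_all_paths fuel neighbor end_ path) []

def find_shortest_circuit (start : String) (end_ : String) : Option (List String) :=
  let paths := find_all_paths 13 start end_ []
  if paths = [] then none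
  else
    let circuits := paths.foldl
      (fun circuits path =>
        if start ∈ pyGraph.getD end_ [] then circuits ++ [path ++ [start]] else circuits) []
    if circuits = [] then none
    else PySem.List.min? circuits (fun c => c.length)   -- min(circuits, key=len); some _ since circuits ≠ []

-- ===== PORT B =====
def dfs_best (fuel : Nat) (node : String) (end_ : String) (path : List String)
    (best : Option (List String)) : Option (List String) :=
  match fuel with
  | 0 => best
  | fuel + 1 =>
    let path := path ++ [node]
    if node = end_ then
      match best with
      | none => some path
      | some b => if path.length < b.length then some path else some b
    else
      (pyGraph.getD node []).foldl
        (fun best nb => if nb ∈ path then best else dfs_best fuel nb end_ path best) best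

def find_shortest_circuit_alt (start : String) (end_ : String) : Option (List String) :=
  match dfs_best 13 start end_ [] none with
  | none => none
  | some b => if start ∈ pyGraph.getD end_ [] then some (b ++ [start]) else none

-- ===== PRECONDITION & SPEC =====
-- Pre_ excludes exactly the inputs where Python A raises KeyError: start not a key of graph
-- (graph[start] in find_all_paths, or graph[end] when start == end is not a key).
def Pre_find_shortest_circuit (start : String) (end_ : String) : Prop :=
  start ∈ pyGraph.keys
instance (start : String) (end_ : String) : Decidable (Pre_find_shortest_circuit start end_) := by
  unfold Pre_find_shortest_circuit; infer_instance

def pvWitness_find_shortest_circuit : String × String := ("A", "F")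

def Spec_find_shortest_circuit (start : String) (end_ : String) (out : Option (List String)) : Prop := out = find_shortest_circuit_alt start end_
instance (start : String) (end_ : String) (out : Option (List String)) : Decidable (Spec_find_shortest_circuit start end_ out) := by unfold Spec_find_shortest_circuit; infer_instance

-- ===== CLAIM (what is proved, stated in full; the proofs are below) =====
def Claim_equal_find_shortest_circuit : Prop := ∀ (start : String) (end_ : String), Dom_find_shortest_circuit start end_ → Pre_find_shortest_circuit start end_ → Spec_find_shortest_circuit start end_ (find_shortest_circuit start end_)

-- ===== LEMMAS AND PROOFS =====

-- the "keep the better path" step B threads through its DFS; it is exactly the fold step of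
-- PySem.List.min? with key = length (see min?_as_fold below)
def updBest (best : Option (List String)) (p : List String) : Option (List String) :=
  match best with
  | none => some p
  | some m => if p.length < m.length then some p else some m

theorem min?_as_fold (l : List (List String)) :
    PySem.List.min? l (fun c => c.length) = l.foldl updBest none := by
  simp only [PySem.List.min?]
  congr 1
  funext acc x
  cases acc <;> rfl

-- B's DFS equals folding its best-update over the path list A's DFS produces
theorem dfs_best_eq_foldl : ∀ (fuel : Nat) (node end_ : String) (path : List String)
    (best : Option (List String)),
    dfs_best fuel node end_ path best = (find_all_paths fuel node end_ path).foldl updBest best := by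
  intro fuel
  induction fuel with
  | zero => intro node end_ path best; rfl
  | succ fuel ih =>
    intro node end_ path best
    by_cases h : node = end_
    · simp [dfs_best, find_all_paths, h, updBest]
    · have L2 : ∀ (nbrs : List String) (ps0 : List (List String)) (best : Option (List String)),
          nbrs.foldl (fun b nb => if nb ∈ path ++ [node] then b
              else dfs_best fuel nb end_ (path ++ [node]) b) (ps0.foldl updBest best)
          = (nbrs.foldl (fun ps nb => if nb ∈ path ++ [node] then ps
              else ps ++ find_all_paths fuel nb end_ (path ++ [node])) ps0).foldl updBest best := by
        intro nbrs
        induction nbrs with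
        | nil => intro ps0 best; rfl
        | cons nb rest ihr =>
          intro ps0 best
          by_cases hm : nb ∈ path ++ [node]
          · simp only [List.foldl_cons, if_pos hm]
            exact ihr ps0 best
          · simp only [List.foldl_cons, if_neg hm]
            rw [ih nb end_ (path ++ [node]) (ps0.foldl updBest best), ← List.foldl_append]
            exact ihr _ best
      simp only [dfs_best, find_all_paths, if_neg h]
      exact L2 (pyGraph.getD node []) [] best

-- appending the fixed closing node to every candidate commutes with the best-update fold
theorem foldl_updBest_map_append (s : String) :
    ∀ (l : List (List String)) (b : Option (List String)),
    (l.map (fun p => p ++ [s])).foldl updBest (b.map (fun p => p ++ [s]))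
      = (l.foldl updBest b).map (fun p => p ++ [s]) := by
  intro l
  induction l with
  | nil => intro b; rfl
  | cons p rest ihr =>
    intro b
    have hstep : updBest (b.map (fun p => p ++ [s])) (p ++ [s])
        = (updBest b p).map (fun p => p ++ [s]) := by
      cases b with
      | none => rfl
      | some m =>
        by_cases h : p.length < m.length <;> simp [updBest, h]
    simpa [hstep] using ihr (updBest b p)

theorem foldl_updBest_none_eq_none_iff (l : List (List String)) :
    l.foldl updBest none = none ↔ l = [] := by
  rw [← min?_as_fold]
  exact PySem.List.min?_eq_none_iff l (fun c => c.length)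

-- ===== VERDICT (by name: the statement is the Claim_ definition above) =====
theorem find_shortest_circuit_spec : Claim_equal_find_shortest_circuit := by
  intro start end_ _ _
  unfold Spec_find_shortest_circuit find_shortest_circuit find_shortest_circuit_alt
  rw [dfs_best_eq_foldl]
  set paths := find_all_paths 13 start end_ [] with hpathsdef
  by_cases hp : paths = []
  · simp [hp]
  · rw [if_neg hp]
    by_cases hc : start ∈ pyGraph.getD end_ []
    · have hcirc : paths.foldl
          (fun circuits path =>
            if start ∈ pyGraph.getD end_ [] then circuits ++ [path ++ [start]] else circuits) []
          = paths.map (fun p => p ++ [start]) := by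
        simp only [if_pos hc]
        simpa using PySem.List.foldl_append_singleton_eq_map (fun p => p ++ [start]) paths []
      rw [hcirc]
      have hne : paths.map (fun p => p ++ [start]) ≠ [] := by simpa using hp
      rw [if_neg hne, min?_as_fold]
      have := foldl_updBest_map_append start paths none
      simp only [Option.map_none] at this
      rw [this]
      obtain ⟨m, hm⟩ : ∃ m, paths.foldl updBest none = some m := by
        cases hfold : paths.foldl updBest none with
        | none => exact absurd ((foldl_updBest_none_eq_none_iff paths).mp hfold) hp
        | some m => exact ⟨m, rfl⟩
      rw [hm]
      simp [hc]
    · have hcirc : paths.foldl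
          (fun circuits path =>
            if start ∈ pyGraph.getD end_ [] then circuits ++ [path ++ [start]] else circuits) []
          = [] := by
        simp only [if_neg hc]
        exact List.foldl_fixed' (fun _ => rfl) paths
      rw [hcirc, if_pos rfl]
      cases hfold : paths.foldl updBest none with
      | none => rfl
      | some m => simp [hc]
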